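-- pv_equiv track=rewrite | github.com/cedriccaille/CSCI_1133 | 6thWeek/quiz06.py | swap_min
-- ===== SOURCE A (Python) =====
-- def swap_min(vals):
--     '''
--     Purpose: Take in list of integers, swaps minimum value with value at index 0
--     Input Parameter(s): vals, list of integers
--     Return Value: altered list, where value at index 0 is replaced with the minimum value of the list
--     '''
--     minimum = vals[0]
--     for i in range(len(vals)):
--         if vals[i] <= minimum:
--             minimum = vals[i]
--             idx = i
--     vals[0], vals[idx] = vals[idx], vals[0]
--     return vals
-- ===== SOURCE B (Python) =====
-- def swap_min(vals):
--     '''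
--     Purpose: Take in list of integers, swaps minimum value with value at index 0
--     Input Parameter(s): vals, list of integers
--     Return Value: altered list, where value at index 0 is replaced with the minimum value of the list
--     '''
--     m = min(vals)
--     idx = len(vals) - 1 - vals[::-1].index(m)
--     vals[0], vals[idx] = vals[idx], vals[0]
--     return vals
-- ===== Notes on version B (the rewrite author's own statement) =====
-- stated objective: alternative
-- what changed: Replaces the single fused min-tracking loop (value+index carried together, <= keeping the last occurrence) with two separate passes: min(vals) to get the value, then locating its last occurrence via .index on the reversed list, then the swap.
-- outside the precondition, e.g. on swap_min([]): A raises IndexError, B raises ValueError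
import Mathlib
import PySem

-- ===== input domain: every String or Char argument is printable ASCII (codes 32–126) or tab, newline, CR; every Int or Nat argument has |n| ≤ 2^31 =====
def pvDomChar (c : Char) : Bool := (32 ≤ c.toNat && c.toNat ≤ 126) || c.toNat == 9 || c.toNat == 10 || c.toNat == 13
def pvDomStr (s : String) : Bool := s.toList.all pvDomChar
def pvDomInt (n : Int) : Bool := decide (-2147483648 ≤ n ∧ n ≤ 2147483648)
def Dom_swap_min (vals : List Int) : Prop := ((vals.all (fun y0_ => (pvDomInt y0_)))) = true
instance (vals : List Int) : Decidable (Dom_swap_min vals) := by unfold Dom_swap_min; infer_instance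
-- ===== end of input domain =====

-- B replaces A's fused min-tracking loop with two passes (min value, then last index via the
-- reversed list) — objective: alternative decomposition; equivalence of the RETURN value only
-- (the Python A mutates vals in place, B performs the same in-place swap).

-- ===== PORT A =====
-- one loop step: if vals[i] <= minimum then minimum, idx := vals[i], i
-- (every index i drawn from range(len(vals)) is in range, so getD's default is never used)
def swapMinStep (vals : List Int) (st : Int × Nat) (i : Nat) : Int × Nat :=
  let v := vals.getD i 0
  if v ≤ st.1 then (v, i) else st

def swap_min (vals : List Int) : List Int :=
  match vals with
  | [] => []          -- vals[0] raises IndexError; excluded by Pre_swap_min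
  | v0 :: _ =>
    -- Python's idx is first assigned at i = 0 (vals[0] <= vals[0]); initial pair (v0, 0) is that state
    let st := (List.range vals.length).foldl (swapMinStep vals) (v0, 0)
    -- vals[0], vals[idx] = vals[idx], vals[0]
    (vals.set 0 (vals.getD st.2 0)).set st.2 v0

-- ===== PORT B =====
def swap_min_alt (vals : List Int) : List Int :=
  match vals with
  | [] => []          -- min([]) raises ValueError; excluded by Pre_swap_min
  | v0 :: _ =>
    let m := (PySem.List.min? vals (fun x => x)).getD 0       -- m = min(vals); list nonempty, so some
    -- idx = len(vals) - 1 - vals[::-1].index(m)   (vals[::-1] = reverse; m ∈ vals, so index? is some)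
    let idx := vals.length - 1 - ((PySem.List.index? vals.reverse m).getD 0)
    (vals.set 0 (vals.getD idx 0)).set idx v0

-- ===== PRECONDITION & SPEC =====
-- A raises IndexError on the empty list (vals[0]); that is the only exception.
def Pre_swap_min (vals : List Int) : Prop := vals ≠ []
instance (vals : List Int) : Decidable (Pre_swap_min vals) := by unfold Pre_swap_min; infer_instance
def pvWitness_swap_min : List Int := [3, 1, 2, 1, 5]

def Spec_swap_min (vals : List Int) (out : List Int) : Prop := out = swap_min_alt vals
instance (vals : List Int) (out : List Int) : Decidable (Spec_swap_min vals out) := by unfold Spec_swap_min; infer_instance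

-- ===== CLAIM (what is proved, stated in full; the proofs are below) =====
def Claim_equal_swap_min : Prop := ∀ (vals : List Int), Dom_swap_min vals → Pre_swap_min vals → Spec_swap_min vals (swap_min vals)

-- ===== LEMMAS AND PROOFS =====

-- Invariant of A's fold over range k (1 ≤ k ≤ n): the carried pair is
-- (minimum of the first k elements, LAST index < k achieving it).
lemma swapMin_fold_inv (vals : List Int) (v0 : Int) (h0 : vals.getD 0 0 = v0)
    (k : Nat) (hk1 : 1 ≤ k) (hk : k ≤ vals.length) :
    let st := (List.range k).foldl (swapMinStep vals) (v0, 0)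
    st.2 < k ∧ vals.getD st.2 0 = st.1 ∧ (∀ i, i < k → st.1 ≤ vals.getD i 0) ∧
      (∀ i, st.2 < i → i < k → vals.getD i 0 ≠ st.1) := by
  induction k, hk1 using Nat.le_induction with
  | base =>
    have hfold : (List.range 1).foldl (swapMinStep vals) (v0, 0) = (v0, 0) := by
      have h0' : vals[0]?.getD 0 = v0 := by simpa [List.getD] using h0
      simp [List.range_one, swapMinStep, h0']
    simp only [hfold]
    refine ⟨Nat.zero_lt_one, h0, ?_, ?_⟩
    · intro i hi; interval_cases i; exact le_of_eq h0.symm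
    · intro i hi hi1; omega
  | succ k hk1' ih =>
    have hkle : k ≤ vals.length := by omega
    obtain ⟨h1, h2, h3, h4⟩ := ih hkle
    set st := (List.range k).foldl (swapMinStep vals) (v0, 0) with hst
    have hrange : List.range (k + 1) = List.range k ++ [k] := List.range_succ
    rw [hrange, List.foldl_append, List.foldl_cons, List.foldl_nil, ← hst]
    by_cases hc : vals.getD k 0 ≤ st.1
    · simp only [swapMinStep]
      rw [if_pos hc]
      refine ⟨by omega, rfl, ?_, ?_⟩
      · intro i hi
        rcases Nat.lt_succ_iff_lt_or_eq.mp hi with h | h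
        · exact le_trans hc (h3 i h)
        · subst h; exact le_refl _
      · intro i hi hi1; omega
    · simp only [swapMinStep]
      rw [if_neg hc]
      refine ⟨by omega, h2, ?_, ?_⟩
      · intro i hi
        rcases Nat.lt_succ_iff_lt_or_eq.mp hi with h | h
        · exact h3 i h
        · subst h; exact le_of_not_ge hc
      · intro i hi hi1
        rcases Nat.lt_succ_iff_lt_or_eq.mp hi1 with h | h
        · exact h4 i hi h
        · subst h; intro he; exact hc (le_of_eq he)

-- characterization is unique: at most one index is a "last occurrence of m"
lemma lastIdx_unique (vals : List Int) (m : Int) (i j : Nat)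
    (hi : i < vals.length) (hj : j < vals.length)
    (hvi : vals.getD i 0 = m) (hvj : vals.getD j 0 = m)
    (hni : ∀ l, i < l → l < vals.length → vals.getD l 0 ≠ m)
    (hnj : ∀ l, j < l → l < vals.length → vals.getD l 0 ≠ m) : i = j := by
  rcases Nat.lt_trichotomy i j with h | h | h
  · exact absurd hvj (hni j h hj)
  · exact h
  · exact absurd hvi (hnj i h hi)

-- ===== VERDICT (by name: the statement is the Claim_ definition above) =====
-- the index n-1-j produced by B (last occurrence of m, via the reversed list) satisfies the
-- same "last occurrence" characterization as A's idx
lemma getD_mem (vals : List Int) (i : Nat) (h : i < vals.length) : vals.getD i 0 ∈ vals := by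
  rw [List.getD_eq_getElem vals 0 h]; exact List.getElem_mem h

theorem swap_min_spec : Claim_equal_swap_min := by
  intro vals _ hpre
  unfold Spec_swap_min
  match vals, hpre with
  | v0 :: rest, _ =>
    set vlist := v0 :: rest with hv
    have hn : 1 ≤ vlist.length := by simp [hv]
    have h0 : vlist.getD 0 0 = v0 := rfl
    obtain ⟨h1, h2, h3, h4⟩ := swapMin_fold_inv vlist v0 h0 vlist.length hn le_rfl
    set st := (List.range vlist.length).foldl (swapMinStep vlist) (v0, 0) with hst
    -- B's minimum
    cases hmin : PySem.List.min? vlist (fun x => x) with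
    | none =>
      exact absurd (((PySem.List.min?_eq_none_iff _ _).mp hmin)) (by simp [hv])
    | some m0 =>
      have hm0mem : m0 ∈ vlist := PySem.List.min?_mem hmin
      have hm0min : ∀ y ∈ vlist, m0 ≤ y := PySem.List.min?_isMin hmin
      -- A's carried value equals B's minimum
      have hstm : st.1 = m0 := by
        have hle1 : m0 ≤ st.1 := h2 ▸ hm0min _ (getD_mem vlist st.2 h1)
        obtain ⟨i, hi, hvi⟩ := List.mem_iff_getElem.mp hm0mem
        have hle2 : st.1 ≤ m0 := by
          have := h3 i hi
          rwa [List.getD_eq_getElem vlist 0 hi, hvi] at this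
        exact le_antisymm hle2 hle1
      -- B's index
      cases hidx : PySem.List.index? vlist.reverse m0 with
      | none =>
        exact absurd (List.mem_reverse.mpr hm0mem)
          ((PySem.List.index?_eq_none_iff _ _).mp hidx)
      | some j =>
        obtain ⟨pre, suf, hdec, hjlen, hm0pre⟩ := ((PySem.List.index?_eq_some_iff _ _ _).mp hidx)
        have hveq : vlist = suf.reverse ++ m0 :: pre.reverse := by
          have := congrArg List.reverse hdec
          simpa using this
        have hlen : vlist.length = suf.length + 1 + pre.length := by
          rw [hveq]; simp; omega
        -- the B index is suf.length, and it is a "last occurrence of m0"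
        have hiB : vlist.length - 1 - j = suf.length := by omega
        have hviB : vlist.getD suf.length 0 = m0 := by
          rw [hveq, List.getD_append_right _ _ _ _ (by simp)]
          simp
        have hnone : ∀ l, suf.length < l → l < vlist.length → vlist.getD l 0 ≠ m0 := by
          intro l hl1 hl2 he
          obtain ⟨k, hk⟩ : ∃ k, l - suf.reverse.length = k + 1 :=
            ⟨l - suf.length - 1, by simp; omega⟩
          rw [hveq, List.getD_append_right _ _ _ _ (by simp; omega), hk,
            List.getD_cons_succ] at he
          have hkb : k < pre.reverse.length := by simp at hk ⊢; omega
          exact hm0pre (List.mem_reverse.mp (he ▸ getD_mem pre.reverse k hkb))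
        -- uniqueness of the last occurrence: A's idx = B's idx
        have hsame : st.2 = suf.length :=
          lastIdx_unique vlist m0 st.2 suf.length h1 (by omega)
            (hstm ▸ h2) hviB (fun l a b => hstm ▸ h4 l a b) hnone
        -- both sides perform the identical swap
        simp only [swap_min, swap_min_alt, hidx, Option.getD_some, hmin, hiB]
        show (vlist.set 0 (vlist.getD st.2 0)).set st.2 v0
            = (vlist.set 0 (vlist.getD suf.length 0)).set suf.length v0
        rw [hsame]
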